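-- pv_equiv track=rewrite | github.com/drshaggy/player2 | lib/get_arrears_n_months.py | get_arrears_n_months
-- ===== SOURCE A (Python) =====
-- def get_arrears_n_months(no_months, array_1d):
--     newArray = []
--     for count, value in enumerate(array_1d):
--         trigger = 0
--         for i in range(no_months):
--             if count - i >= 0:
--                 trigger += array_1d[count - i]
--             else:
--                 pass
--         if trigger == 0:
--             newArray.append(0)
--         else:
--             newArray.append(1)
--     return newArray
-- ===== SOURCE B (Python) =====
-- def get_arrears_n_months(no_months, array_1d):
--     # Sliding-window running sum: O(n) instead of O(n*no_months).
--     if no_months <= 0: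
--         return [0] * len(array_1d)
--     out = []
--     s = 0
--     for idx, v in enumerate(array_1d):
--         s += v
--         if idx >= no_months:
--             s -= array_1d[idx - no_months]
--         out.append(0 if s == 0 else 1)
--     return out
-- ===== Notes on version B (the rewrite author's own statement) =====
-- stated objective: faster
-- what changed: Replaces A's inner loop that re-sums the last no_months entries at every position with a single sliding-window running sum (add the entering element, subtract the leaving one), turning O(n*no_months) into O(n).
import Mathlib
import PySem

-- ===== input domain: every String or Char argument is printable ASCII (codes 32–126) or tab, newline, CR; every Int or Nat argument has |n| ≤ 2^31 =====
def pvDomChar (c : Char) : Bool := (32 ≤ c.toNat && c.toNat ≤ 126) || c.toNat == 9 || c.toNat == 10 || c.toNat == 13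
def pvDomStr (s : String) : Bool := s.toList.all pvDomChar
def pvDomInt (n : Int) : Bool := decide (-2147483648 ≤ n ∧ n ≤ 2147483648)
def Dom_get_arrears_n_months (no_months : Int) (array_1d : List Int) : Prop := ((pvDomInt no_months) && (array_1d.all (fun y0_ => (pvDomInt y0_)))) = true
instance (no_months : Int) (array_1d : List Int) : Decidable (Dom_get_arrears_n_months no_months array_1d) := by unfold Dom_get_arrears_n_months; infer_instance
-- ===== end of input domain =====

-- B replaces A's rescan of the last no_months entries at every position by a single
-- sliding-window running sum (O(n) instead of O(n·no_months)); same return values everywhere.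

-- ===== PORT A =====
def get_arrears_n_months (no_months : Int) (array_1d : List Int) : List Int :=
  (PySem.List.enumerate array_1d).foldl (fun newArray cv =>
    let trigger := (PySem.List.pyRange 0 no_months 1).foldl (fun trigger i =>
      if cv.1 - i ≥ 0 then trigger + PySem.List.pyGetD array_1d (cv.1 - i) 0 else trigger) 0
    newArray ++ [if trigger = 0 then (0 : Int) else 1]) []

-- ===== PORT B =====
def get_arrears_n_months_alt (no_months : Int) (array_1d : List Int) : List Int :=
  if no_months ≤ 0 then List.replicate array_1d.length 0
  else
    ((PySem.List.enumerate array_1d).foldl (fun (st : Int × List Int) p =>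
      let s1 := st.1 + p.2
      let s := if p.1 ≥ no_months then s1 - PySem.List.pyGetD array_1d (p.1 - no_months) 0 else s1
      (s, st.2 ++ [if s = 0 then (0 : Int) else 1])) ((0 : Int), ([] : List Int))).2

-- ===== PRECONDITION & SPEC =====
def Spec_get_arrears_n_months (no_months : Int) (array_1d : List Int) (out : List Int) : Prop := out = get_arrears_n_months_alt no_months array_1d
instance (no_months : Int) (array_1d : List Int) (out : List Int) : Decidable (Spec_get_arrears_n_months no_months array_1d out) := by unfold Spec_get_arrears_n_months; infer_instance

-- ===== CLAIM (what is proved, stated in full; the proofs are below) =====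
def Claim_equal_get_arrears_n_months : Prop := ∀ (no_months : Int) (array_1d : List Int), Dom_get_arrears_n_months no_months array_1d → Spec_get_arrears_n_months no_months array_1d (get_arrears_n_months no_months array_1d)

-- ===== LEMMAS AND PROOFS =====

-- sum of the window of (at most) the last m entries of the first j entries
def winSum (m : Nat) (xs : List Int) (j : Nat) : Int := ((xs.take j).drop (j - m)).sum

theorem winSum_zero (xs : List Int) (j : Nat) : winSum 0 xs j = 0 := by
  unfold winSum
  rw [List.drop_eq_nil_of_le (by simp)]
  rfl

-- growing the window by one month adds the entry m back from position k (if it exists)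
theorem winSum_succ_month (xs : List Int) (m k : Nat) (hk : k < xs.length) :
    winSum (m + 1) xs (k + 1) = winSum m xs (k + 1) + (if m ≤ k then xs.getD (k - m) 0 else 0) := by
  unfold winSum
  by_cases h : m ≤ k
  · have hlt : k - m < (xs.take (k + 1)).length := by
      simp [List.length_take]; omega
    rw [show k + 1 - (m + 1) = k - m by omega,
        List.drop_eq_getElem_cons hlt,
        show k + 1 - m = (k - m) + 1 by omega]
    have hgd : xs.getD (k - m) 0 = (xs.take (k + 1))[k - m] := by
      rw [List.getElem_take]
      exact List.getD_eq_getElem xs 0 (by omega)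
    simp [h, add_comm, List.getElem_take, List.getElem?_eq_getElem (show k - m < xs.length by omega)]
  · rw [show k + 1 - (m + 1) = 0 by omega, show k + 1 - m = 0 by omega]
    simp [h]

-- moving the window one position right adds xs[j] and removes xs[j-m] (if the window was full)
theorem winSum_step (xs : List Int) (m j : Nat) (hm : 1 ≤ m) (hj : j < xs.length) :
    winSum m xs (j + 1) = (winSum m xs j + xs.getD j 0) - (if m ≤ j then xs.getD (j - m) 0 else 0) := by
  unfold winSum
  have htake : xs.take (j + 1) = xs.take j ++ [xs[j]] := by
    rw [List.take_add_one]
    simp [List.getElem?_eq_getElem hj]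
  have hlen : (xs.take j).length = j := by simp [List.length_take]; omega
  have hdropapp : (xs.take j ++ [xs[j]]).drop (j + 1 - m) = (xs.take j).drop (j + 1 - m) ++ [xs[j]] := by
    rw [List.drop_append_of_le_length (by omega)]
  rw [htake, hdropapp]
  have hgdj : xs.getD j 0 = xs[j] := List.getD_eq_getElem xs 0 hj
  by_cases h : m ≤ j
  · have hlt : j - m < (xs.take j).length := by omega
    rw [show j + 1 - m = (j - m) + 1 by omega]
    have : (xs.take j).drop (j - m) = (xs.take j)[j - m] :: (xs.take j).drop (j - m + 1) :=
      List.drop_eq_getElem_cons hlt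
    have hgd : xs.getD (j - m) 0 = (xs.take j)[j - m] := by
      rw [List.getElem_take]
      exact List.getD_eq_getElem xs 0 (by omega)
    rw [this]
    simp [h, List.getElem_take, List.getElem?_eq_getElem hj,
      List.getElem?_eq_getElem (show j - m < xs.length by omega)]
    ring
  · simp only [if_neg h, sub_zero, show j + 1 - m = 0 by omega, show j - m = 0 by omega,
      List.drop_zero, List.sum_append, List.sum_cons, List.sum_nil, hgdj]
    ring

-- A's inner loop computes the window sum
theorem trig_eq (xs : List Int) (k : Nat) (hk : k < xs.length) (m : Nat) :
    (PySem.List.pyRange 0 (m : Int) 1).foldl (fun trigger i =>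
      if (k : Int) - i ≥ 0 then trigger + PySem.List.pyGetD xs ((k : Int) - i) 0 else trigger) 0
    = winSum m xs (k + 1) := by
  induction m with
  | zero =>
    rw [show ((0 : Nat) : Int) = 0 by rfl, PySem.List.pyRange_one_eq_nil le_rfl, winSum_zero]
    rfl
  | succ m ih =>
    rw [show ((m + 1 : Nat) : Int) = (m : Int) + 1 by push_cast; ring,
        PySem.List.pyRange_one_succ_right (Int.natCast_nonneg m), List.foldl_append, ih,
        winSum_succ_month xs m k hk]
    simp only [List.foldl_cons, List.foldl_nil]
    by_cases h : m ≤ k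
    · have hge : (k : Int) - (m : Int) ≥ 0 := by omega
      have hcast : (k : Int) - (m : Int) = ((k - m : Nat) : Int) := by omega
      rw [if_pos hge, hcast, PySem.List.pyGetD_natCast, if_pos h]
    · have hge : ¬ ((k : Int) - (m : Int) ≥ 0) := by omega
      rw [if_neg hge, if_neg h, add_zero]

-- A's inner loop for the actual Int month count
theorem trig_eq_int (xs : List Int) (k : Nat) (hk : k < xs.length) (n : Int) :
    (PySem.List.pyRange 0 n 1).foldl (fun trigger i =>
      if (k : Int) - i ≥ 0 then trigger + PySem.List.pyGetD xs ((k : Int) - i) 0 else trigger) 0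
    = winSum n.toNat xs (k + 1) := by
  by_cases hn : n ≤ 0
  · rw [PySem.List.pyRange_one_eq_nil hn, show n.toNat = 0 by omega, winSum_zero]
    rfl
  · rw [show n = ((n.toNat : Nat) : Int) by omega]
    exact trig_eq xs k hk n.toNat

-- A returns the per-position window-sum flags
theorem A_eq (n : Int) (xs : List Int) :
    get_arrears_n_months n xs
    = (List.range xs.length).map (fun k => if winSum n.toNat xs (k + 1) = 0 then (0 : Int) else 1) := by
  unfold get_arrears_n_months
  rw [PySem.List.enumerate_eq_map_pyRange xs 0, List.foldl_map, PySem.List.len_eq,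
      PySem.List.pyRange_zero_natCast, List.foldl_map]
  rw [PySem.List.foldl_append_singleton_eq_map
        (fun j : Nat => if (PySem.List.pyRange 0 n 1).foldl (fun trigger i =>
          if (j : Int) - i ≥ 0 then trigger + PySem.List.pyGetD xs ((j : Int) - i) 0 else trigger) 0 = 0
          then (0 : Int) else 1)
        (List.range xs.length) []]
  rw [List.nil_append]
  exact List.map_congr_left (fun k hk =>
    by rw [trig_eq_int xs k (List.mem_range.mp hk) n])

-- B's loop invariant: after j steps the state is (window sum at j, flags for positions < j)
theorem B_inv (n : Int) (hn : 0 < n) (xs : List Int) (j : Nat) (hj : j ≤ xs.length) :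
    (List.range j).foldl (fun (st : Int × List Int) (k : Nat) =>
      let s1 := st.1 + PySem.List.pyGetD xs (k : Int) 0
      let s := if (k : Int) ≥ n then s1 - PySem.List.pyGetD xs ((k : Int) - n) 0 else s1
      (s, st.2 ++ [if s = 0 then (0 : Int) else 1])) ((0 : Int), ([] : List Int))
    = (winSum n.toNat xs j,
       (List.range j).map (fun k => if winSum n.toNat xs (k + 1) = 0 then (0 : Int) else 1)) := by
  induction j with
  | zero =>
    have : winSum n.toNat xs 0 = 0 := by unfold winSum; simp
    simp [this]
  | succ j ih =>
    rw [List.range_succ, List.foldl_append, ih (by omega), List.foldl_cons, List.foldl_nil,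
        List.map_append]
    have hjlt : j < xs.length := by omega
    have hgd : PySem.List.pyGetD xs (j : Int) 0 = xs.getD j 0 := by
      rw [PySem.List.pyGetD_natCast]
    have hstep := winSum_step xs n.toNat j (by omega) hjlt
    by_cases h : (j : Int) ≥ n
    · have hle : n.toNat ≤ j := by omega
      have hcast : (j : Int) - n = ((j - n.toNat : Nat) : Int) := by omega
      have hs : winSum n.toNat xs (j + 1)
          = winSum n.toNat xs j + xs.getD j 0 - xs.getD (j - n.toNat) 0 := by
        rw [hstep, if_pos hle]
      simp only [if_pos h, hgd, hcast, PySem.List.pyGetD_natCast, ← hs, List.map_cons,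
        List.map_nil]
    · have hle : ¬ n.toNat ≤ j := by omega
      have hs : winSum n.toNat xs (j + 1) = winSum n.toNat xs j + xs.getD j 0 := by
        rw [hstep, if_neg hle, sub_zero]
      simp only [if_neg h, hgd, ← hs, List.map_cons, List.map_nil]

-- B returns the per-position window-sum flags
theorem B_eq (n : Int) (xs : List Int) :
    get_arrears_n_months_alt n xs
    = (List.range xs.length).map (fun k => if winSum n.toNat xs (k + 1) = 0 then (0 : Int) else 1) := by
  unfold get_arrears_n_months_alt
  by_cases hn : n ≤ 0
  · rw [if_pos hn]
    have : ∀ k ∈ List.range xs.length,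
        (if winSum n.toNat xs (k + 1) = 0 then (0 : Int) else 1) = 0 := by
      intro k _
      rw [show n.toNat = 0 by omega, winSum_zero]
      simp
    rw [List.map_congr_left this, List.map_const', List.length_range]
  · rw [if_neg hn]
    rw [PySem.List.enumerate_eq_map_pyRange xs 0, List.foldl_map, PySem.List.len_eq,
        PySem.List.pyRange_zero_natCast, List.foldl_map]
    rw [B_inv n (by omega) xs xs.length le_rfl]

-- ===== VERDICT (by name: the statement is the Claim_ definition above) =====
theorem get_arrears_n_months_spec : Claim_equal_get_arrears_n_months := by
  intro n xs _
  unfold Spec_get_arrears_n_months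
  rw [A_eq, B_eq]
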